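-- pv_equiv track=rewrite | github.com/franbenegas/Tesis | Graficos tesis.py | filter_maxima
-- ===== SOURCE A (Python) =====
-- def filter_maxima(peaks_max, peaks_min, pressure):
--     filtered_maxima = []
--     for i in range(1, len(peaks_min)):
--         # Find maxima between consecutive minima
--         max_between_min = [p for p in peaks_max if peaks_min[i-1] < p < peaks_min[i]]
--
--         if max_between_min:
--             # Keep the highest max within the minima range
--             highest_max = max(max_between_min, key=lambda p: pressure[p])
--             filtered_maxima.append(highest_max)
--
--     return filtered_maxima
-- ===== SOURCE B (Python) =====
-- def filter_maxima(peaks_max, peaks_min, pressure):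
--     # One pass over peaks_max maintaining a running best index per minima interval
--     pairs = list(zip(peaks_min, peaks_min[1:]))
--     best = [None] * len(pairs)
--     for p in peaks_max:
--         best = [p if lo < p < hi and (b is None or pressure[p] > pressure[b]) else b
--                 for b, (lo, hi) in zip(best, pairs)]
--     return [b for b in best if b is not None]
-- ===== Notes on version B (the rewrite author's own statement) =====
-- stated objective: alternative
-- what changed: Instead of A's loop over minima indices that builds a candidate list and calls max(key=...) for each interval, B makes a single left-to-right pass over peaks_max maintaining one running best peak per consecutive-minima interval (zipped pairs), emitting the non-empty bests at the end.
import Mathlib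
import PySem

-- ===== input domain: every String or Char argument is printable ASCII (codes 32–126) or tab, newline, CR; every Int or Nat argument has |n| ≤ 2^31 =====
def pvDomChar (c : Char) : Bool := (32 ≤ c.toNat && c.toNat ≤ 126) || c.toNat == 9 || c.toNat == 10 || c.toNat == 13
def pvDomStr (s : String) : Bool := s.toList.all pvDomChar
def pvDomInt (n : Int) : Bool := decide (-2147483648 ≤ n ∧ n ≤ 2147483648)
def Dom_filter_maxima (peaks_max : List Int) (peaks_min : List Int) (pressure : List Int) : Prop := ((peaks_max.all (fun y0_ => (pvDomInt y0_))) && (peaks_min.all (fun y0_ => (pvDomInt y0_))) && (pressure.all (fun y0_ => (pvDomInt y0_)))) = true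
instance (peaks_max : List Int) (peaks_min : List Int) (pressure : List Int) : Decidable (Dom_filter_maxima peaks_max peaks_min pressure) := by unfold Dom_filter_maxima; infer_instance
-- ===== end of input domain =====

-- B replaces A's per-interval candidate-list + max(key=...) scans by a single left-to-right pass over
-- peaks_max that maintains one running best index per consecutive-minima interval (objective: alternative).

-- ===== PORT A =====
-- pressure[p] is ported as pyGetD pressure p 0; exact whenever the index is in range, which Pre_ guarantees.
def filter_maxima (peaks_max : List Int) (peaks_min : List Int) (pressure : List Int) : List Int :=
  (PySem.List.pyRange 1 (peaks_min.length : Int) 1).foldl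
    (fun acc i =>
      let between := peaks_max.filter (fun p =>
        decide (PySem.List.pyGetD peaks_min (i - 1) 0 < p) && decide (p < PySem.List.pyGetD peaks_min i 0))
      if between.isEmpty then acc
      else acc ++ [(PySem.List.max? between (fun p => PySem.List.pyGetD pressure p 0)).getD 0])
    []

-- ===== PORT B =====
-- pressure[p]/pressure[b] ported as pyGetD … 0; exact whenever the index is in range, which Pre_ guarantees.
def filter_maxima_alt (peaks_max : List Int) (peaks_min : List Int) (pressure : List Int) : List Int :=
  let pairs := peaks_min.zip (PySem.List.slice peaks_min (some 1) none)
  let best := peaks_max.foldl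
    (fun best p =>
      (best.zip pairs).map (fun bq =>
        if (decide (bq.2.1 < p) && decide (p < bq.2.2)) &&
           (match bq.1 with
            | none => true
            | some b => decide (PySem.List.pyGetD pressure b 0 < PySem.List.pyGetD pressure p 0))
        then some p else bq.1))
    (pairs.map (fun _ => (none : Option Int)))
  best.filterMap id

-- ===== PRECONDITION & SPEC =====
-- Pre_ excludes exactly the inputs on which Python A raises IndexError: some peak that lies strictly
-- between a consecutive pair of minima is not a valid (possibly negative) index into pressure.
def Pre_filter_maxima (peaks_max : List Int) (peaks_min : List Int) (pressure : List Int) : Prop :=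
  ∀ p ∈ peaks_max, (∃ q ∈ peaks_min.zip peaks_min.tail, q.1 < p ∧ p < q.2) →
    PySem.Raise.InRange pressure.length p
instance (peaks_max : List Int) (peaks_min : List Int) (pressure : List Int) : Decidable (Pre_filter_maxima peaks_max peaks_min pressure) := by unfold Pre_filter_maxima; infer_instance

def pvWitness_filter_maxima : List Int × List Int × List Int := ([2, 1], [0, 5, 1], [0, 7, 3])

def Spec_filter_maxima (peaks_max : List Int) (peaks_min : List Int) (pressure : List Int) (out : List Int) : Prop := out = filter_maxima_alt peaks_max peaks_min pressure
instance (peaks_max : List Int) (peaks_min : List Int) (pressure : List Int) (out : List Int) : Decidable (Spec_filter_maxima peaks_max peaks_min pressure out) := by unfold Spec_filter_maxima; infer_instance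

-- ===== CLAIM (what is proved, stated in full; the proofs are below) =====
def Claim_equal_filter_maxima : Prop := ∀ (peaks_max : List Int) (peaks_min : List Int) (pressure : List Int), Dom_filter_maxima peaks_max peaks_min pressure → Pre_filter_maxima peaks_max peaks_min pressure → Spec_filter_maxima peaks_max peaks_min pressure (filter_maxima peaks_max peaks_min pressure)

-- ===== LEMMAS AND PROOFS =====

-- membership test for an interval
def pvIn (q : Int × Int) (p : Int) : Bool := decide (q.1 < p) && decide (p < q.2)

-- the "best maximum" of one interval, as A computes it
def pvBest (pressure : List Int) (pm : List Int) (q : Int × Int) : Option Int :=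
  PySem.List.max? (pm.filter (pvIn q)) (fun p => PySem.List.pyGetD pressure p 0)

-- A's loop body, expressed on a pair of consecutive minima
def pvGstep (pm pressure : List Int) (acc : List Int) (q : Int × Int) : List Int :=
  let between := pm.filter (pvIn q)
  if between.isEmpty then acc
  else acc ++ [(PySem.List.max? between (fun p => PySem.List.pyGetD pressure p 0)).getD 0]

lemma pv_zip_map {α β : Type} (l : List α) (f : α → β) :
    (l.map f).zip l = l.map (fun q => (f q, q)) := by
  induction l with
  | nil => simp
  | cons a t ih => simp [ih]

-- B's outer fold over peaks_max, with per-interval state pairs.map f, commutes to a map of per-interval folds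
lemma pv_fold_shape (pairs : List (Int × Int)) (g : Int → Option Int → Int × Int → Option Int) :
    ∀ (pm : List Int) (f : Int × Int → Option Int),
      pm.foldl (fun best p => (best.zip pairs).map (fun bq => g p bq.1 bq.2)) (pairs.map f)
        = pairs.map (fun q => pm.foldl (fun b p => g p b q) (f q)) := by
  intro pm
  induction pm with
  | nil => intro f; simp
  | cons p t ih =>
      intro f
      simp only [List.foldl_cons, pv_zip_map, List.map_map, Function.comp_def]
      exact ih (fun q => g p (f q) q)

-- one interval's running best equals the strict-update fold of A's max? over the filtered candidates
lemma pv_fold_best (pressure : List Int) (q : Int × Int) :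
    ∀ (pm : List Int) (b : Option Int),
      pm.foldl (fun b p =>
          if ((decide (q.1 < p) && decide (p < q.2)) &&
             (match b with
              | none => true
              | some b => decide (PySem.List.pyGetD pressure b 0 < PySem.List.pyGetD pressure p 0)))
          then some p else b) b
        = (pm.filter (pvIn q)).foldl (fun acc x =>
            match acc with
            | none => some x
            | some m => if PySem.List.pyGetD pressure m 0 < PySem.List.pyGetD pressure x 0 then some x else some m) b := by
  intro pm
  induction pm with
  | nil => intro b; simp
  | cons p t ih =>
      intro b
      by_cases h : pvIn q p = true
      · rw [List.foldl_cons, List.filter_cons_of_pos h, List.foldl_cons, ih]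
        congr 1
        have h' : (decide (q.1 < p) && decide (p < q.2)) = true := h
        cases b with
        | none => simp [h']
        | some m => simp only [h', Bool.true_and]; split_ifs <;> simp_all
      · rw [List.foldl_cons, List.filter_cons_of_neg h, ih]
        congr 1
        have h' : (decide (q.1 < p) && decide (p < q.2)) = false := by
          simpa [pvIn] using h
        simp [h']

lemma pv_filterMap_eq_flatMap {α β : Type} (l : List α) (f : α → Option β) :
    l.filterMap f = l.flatMap (fun x => (f x).toList) := by
  induction l with
  | nil => simp
  | cons a t ih => cases h : f a <;> simp [h, ih]

-- A's step equals "append the interval's best, if any"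
lemma pv_gstep_toList (pm pressure : List Int) (acc : List Int) (q : Int × Int) :
    pvGstep pm pressure acc q = acc ++ (pvBest pressure pm q).toList := by
  unfold pvGstep pvBest
  by_cases h : (pm.filter (pvIn q)).isEmpty
  · rw [if_pos h]
    have : pm.filter (pvIn q) = [] := by simpa [List.isEmpty_iff] using h
    simp [this, PySem.List.max?]
  · rw [if_neg h]
    have hne : pm.filter (pvIn q) ≠ [] := by simpa [List.isEmpty_iff] using h
    cases hmax : PySem.List.max? (pm.filter (pvIn q)) (fun p => PySem.List.pyGetD pressure p 0) with
    | none => exact absurd ((PySem.List.max?_eq_none_iff _ _).mp hmax) hne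
    | some m => simp

-- the zip of consecutive minima, read off at index i-1
lemma pv_pairs_get (pmin : List Int) (i : Int) (h1 : 1 ≤ i) (h2 : i < (pmin.length : Int)) :
    PySem.List.pyGetD (pmin.zip pmin.tail) (i - 1) ((0 : Int), (0 : Int))
      = (PySem.List.pyGetD pmin (i - 1) 0, PySem.List.pyGetD pmin i 0) := by
  have hlen : (pmin.zip pmin.tail).length = pmin.length - 1 := by
    simp [List.length_zip, List.length_tail]
  have hi2 : i - 1 < (((pmin.zip pmin.tail).length : Nat) : Int) := by
    rw [hlen]; omega
  rw [PySem.List.pyGetD_eq_getElem _ _ (by omega) hi2,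
      PySem.List.pyGetD_eq_getElem _ (0 : Int) (by omega) (by omega : i - 1 < (pmin.length : Int)),
      PySem.List.pyGetD_eq_getElem _ (0 : Int) (by omega) h2]
  rw [List.getElem_zip]
  simp only [Prod.mk.injEq]
  refine ⟨trivial, ?_⟩
  rw [List.getElem_tail]
  have hidx : (i - 1).toNat + 1 = i.toNat := by omega
  congr 1

-- A, re-expressed as a fold over the list of consecutive-minima pairs
lemma pv_A_eq_pairs_fold (pm pmin pressure : List Int) :
    filter_maxima pm pmin pressure = (pmin.zip pmin.tail).foldl (pvGstep pm pressure) [] := by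
  unfold filter_maxima
  rw [PySem.List.foldl_congr_mem _ _
      (fun acc i => pvGstep pm pressure acc (PySem.List.pyGetD (pmin.zip pmin.tail) (i - 1) ((0:Int),(0:Int)))) _
      (by
        intro acc i hi
        rw [PySem.List.mem_pyRange_one] at hi
        show _ = pvGstep pm pressure acc (PySem.List.pyGetD (pmin.zip pmin.tail) (i - 1) ((0:Int),(0:Int)))
        rw [pv_pairs_get pmin i hi.1 hi.2]
        rfl)]
  rcases pmin with _ | ⟨a, t⟩
  · simp [PySem.List.pyRange_one_eq_nil]
  · have key := PySem.List.foldl_pyRange_zero_pyGetD ((a :: t).zip (a :: t).tail)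
      ((0:Int),(0:Int)) (pvGstep pm pressure) ([] : List Int)
    rw [← key]
    have hlen : PySem.List.len ((a :: t).zip (a :: t).tail) = (t.length : Int) := by
      simp [PySem.List.len_eq]
    rw [hlen, PySem.List.pyRange_one, PySem.List.pyRange_zero_nat, List.foldl_map, List.foldl_map]
    have hr : ((((a :: t).length : Int) - 1).toNat) = t.length := by simp
    rw [hr]
    apply PySem.List.foldl_congr_mem
    intro acc k _
    have : (1 : Int) + (k : Int) - 1 = (k : Int) := by omega
    rw [this]

-- B, re-expressed through pvBest
lemma pv_B_eq (pm pmin pressure : List Int) :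
    filter_maxima_alt pm pmin pressure
      = ((pmin.zip pmin.tail).map (pvBest pressure pm)).filterMap id := by
  unfold filter_maxima_alt
  rw [PySem.List.slice_from_one]
  simp only
  rw [pv_fold_shape (pmin.zip pmin.tail)
    (fun p b q =>
      if ((decide (q.1 < p) && decide (p < q.2)) &&
         (match b with
          | none => true
          | some b => decide (PySem.List.pyGetD pressure b 0 < PySem.List.pyGetD pressure p 0)))
      then some p else b)
    pm (fun _ => none)]
  congr 1
  apply List.map_congr_left
  intro q _
  rw [pv_fold_best pressure q pm none]
  unfold pvBest PySem.List.max?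
  apply PySem.List.foldl_congr_mem
  intro acc x _
  cases acc <;> simp

lemma pv_main (pm pmin pressure : List Int) :
    filter_maxima pm pmin pressure = filter_maxima_alt pm pmin pressure := by
  rw [pv_A_eq_pairs_fold, pv_B_eq]
  rw [PySem.List.foldl_congr_mem _ _
      (fun acc q => acc ++ (pvBest pressure pm q).toList) _
      (by intro acc q _; exact pv_gstep_toList pm pressure acc q)]
  rw [PySem.List.foldl_append_eq_flatMap, List.nil_append, List.filterMap_map,
      pv_filterMap_eq_flatMap]
  rfl

-- ===== VERDICT (by name: the statement is the Claim_ definition above) =====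
theorem filter_maxima_spec : Claim_equal_filter_maxima := by
  intro pm pmin pressure _ _
  unfold Spec_filter_maxima
  exact pv_main pm pmin pressure
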